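-- pv_equiv track=rewrite | github.com/jackinf/aoc | python/2023/day14/part1.py | calculate_north_load
-- ===== SOURCE A (Python) =====
-- def calculate_north_load(grid):
--     results = []
--     for col in range(len(grid[0])):
--         results.append([])
--
--         power = len(grid)
--         for row in range(len(grid)):
--             if grid[row][col] == 'O':
--                 results[-1].append(power)
--                 power -= 1
--             if grid[row][col] == '#':
--                 power = len(grid) - row - 1
--
--     return sum([sum(values) for values in results])
-- ===== SOURCE B (Python) =====
-- def calculate_north_load(grid):
--     n = len(grid)
--     width = len(grid[0])
--     total = 0
--     for col in range(width):
--         t = 0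
--         k = 0
--         for row in range(n):
--             cell = grid[row][col]
--             if cell == '#':
--                 total += k * (n - t) - k * (k - 1) // 2
--                 t = row + 1
--                 k = 0
--             elif cell == 'O':
--                 k += 1
--         total += k * (n - t) - k * (k - 1) // 2
--     return total
-- ===== Notes on version B (the rewrite author's own statement) =====
-- stated objective: alternative
-- what changed: B replaces A's per-rock list-building (append each landing power to a per-column list, decrement a running power, then sum all the lists) by a per-segment closed form: it counts the k 'O' cells in each '#'-bounded column segment starting at row t and adds k*(n-t) - k*(k-1)//2 directly to a running total, never materialising the lists of powers.
import Mathlib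
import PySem

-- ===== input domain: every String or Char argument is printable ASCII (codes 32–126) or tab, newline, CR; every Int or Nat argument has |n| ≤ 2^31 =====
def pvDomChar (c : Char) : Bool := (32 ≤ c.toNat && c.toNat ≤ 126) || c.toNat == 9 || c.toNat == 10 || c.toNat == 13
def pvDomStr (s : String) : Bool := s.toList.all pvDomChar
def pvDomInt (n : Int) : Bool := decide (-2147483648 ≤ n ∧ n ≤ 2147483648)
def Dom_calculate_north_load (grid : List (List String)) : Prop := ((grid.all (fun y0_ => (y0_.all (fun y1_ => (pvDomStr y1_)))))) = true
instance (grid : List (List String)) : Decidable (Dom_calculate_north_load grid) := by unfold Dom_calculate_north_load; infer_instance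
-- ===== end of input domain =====

-- B computes each column's load per '#'-bounded segment with a closed-form sum instead of
-- appending one power per rock to per-column lists and summing them (alternative decomposition).

-- ===== PORT A =====
def calculate_north_load (grid : List (List String)) : Int :=
  let n : Int := (grid.length : Int)
  let results : List (List Int) :=
    (PySem.List.pyRange 0 ((PySem.List.pyGetD grid 0 ([] : List String)).length : Int) 1).foldl
      (fun results col =>
        let vals_power :=
          (PySem.List.pyRange 0 n 1).foldl
            (fun (st : List Int × Int) row =>
              let st2 := if PySem.List.pyGetD (PySem.List.pyGetD grid row ([] : List String)) col "" = "O"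
                         then (st.1 ++ [st.2], st.2 - 1) else st
              if PySem.List.pyGetD (PySem.List.pyGetD grid row ([] : List String)) col "" = "#"
              then (st2.1, n - row - 1) else st2)
            (([] : List Int), n)
        results ++ [vals_power.1])
      []
  (results.map (fun values => values.foldl (· + ·) 0)).foldl (· + ·) 0

-- ===== PORT B =====
def calculate_north_load_alt (grid : List (List String)) : Int :=
  let n : Int := (grid.length : Int)
  let width : Int := ((PySem.List.pyGetD grid 0 ([] : List String)).length : Int)
  (PySem.List.pyRange 0 width 1).foldl
    (fun total col =>
      let st :=
        (PySem.List.pyRange 0 n 1).foldl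
          (fun (st : Int × Int × Int) row =>
            if PySem.List.pyGetD (PySem.List.pyGetD grid row ([] : List String)) col "" = "#"
            then (row + 1, 0, st.2.2 + st.2.1 * (n - st.1) - PySem.Int.floordiv (st.2.1 * (st.2.1 - 1)) 2)
            else if PySem.List.pyGetD (PySem.List.pyGetD grid row ([] : List String)) col "" = "O"
            then (st.1, st.2.1 + 1, st.2.2)
            else st)
          (0, 0, total)
      st.2.2 + st.2.1 * (n - st.1) - PySem.Int.floordiv (st.2.1 * (st.2.1 - 1)) 2)
    0

-- ===== PRECONDITION & SPEC =====
-- Pre_ excludes exactly the inputs where Python A raises IndexError: the empty grid (grid[0])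
-- and ragged grids with a row shorter than the first row (grid[row][col]); Python B raises there too.
def Pre_calculate_north_load (grid : List (List String)) : Prop :=
  grid ≠ [] ∧ ∀ r ∈ grid, (PySem.List.pyGetD grid 0 ([] : List String)).length ≤ r.length
instance (grid : List (List String)) : Decidable (Pre_calculate_north_load grid) := by
  unfold Pre_calculate_north_load; infer_instance
def pvWitness_calculate_north_load : List (List String) :=
  [["O", ".", "#"], ["#", "O", "O"], [".", "O", "."]]
def Spec_calculate_north_load (grid : List (List String)) (out : Int) : Prop := out = calculate_north_load_alt grid
instance (grid : List (List String)) (out : Int) : Decidable (Spec_calculate_north_load grid out) := by unfold Spec_calculate_north_load; infer_instance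

-- ===== CLAIM (what is proved, stated in full; the proofs are below) =====
def Claim_equal_calculate_north_load : Prop := ∀ (grid : List (List String)), Dom_calculate_north_load grid → Pre_calculate_north_load grid → Spec_calculate_north_load grid (calculate_north_load grid)

-- ===== LEMMAS AND PROOFS =====

-- A's inner-loop body (as a named function, for the induction)
def pvFA (N : Int) (c : Int → String) (st : List Int × Int) (row : Int) : List Int × Int :=
  let st2 := if c row = "O" then (st.1 ++ [st.2], st.2 - 1) else st
  if c row = "#" then (st2.1, N - row - 1) else st2

-- B's inner-loop body
def pvFB (N : Int) (c : Int → String) (st : Int × Int × Int) (row : Int) : Int × Int × Int :=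
  if c row = "#" then (row + 1, 0, st.2.2 + st.2.1 * (N - st.1) - PySem.Int.floordiv (st.2.1 * (st.2.1 - 1)) 2)
  else if c row = "O" then (st.1, st.2.1 + 1, st.2.2)
  else st

def pvSum (xs : List Int) : Int := xs.foldl (· + ·) 0

-- A's inner loop over one column (the list of appended powers)
def pvColA (N : Int) (c : Int → String) (rows : List Int) : List Int :=
  (rows.foldl (pvFA N c) (([] : List Int), N)).1

-- B's inner loop over one column followed by the final flush
def pvColB (N : Int) (c : Int → String) (rows : List Int) (total : Int) : Int :=
  let st := rows.foldl (pvFB N c) (0, 0, total)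
  st.2.2 + st.2.1 * (N - st.1) - PySem.Int.floordiv (st.2.1 * (st.2.1 - 1)) 2

-- closed-form load of a segment starting at row t holding k rocks
def pvSeg (N t k : Int) : Int := k * (N - t) - PySem.Int.floordiv (k * (k - 1)) 2

theorem pvSum_nil : pvSum [] = 0 := rfl

theorem pvSum_append (xs : List Int) (x : Int) : pvSum (xs ++ [x]) = pvSum xs + x := by
  simp [pvSum, List.foldl_append]

theorem pvSeg_zero (N t : Int) : pvSeg N t 0 = 0 := by
  simp [pvSeg, PySem.Int.floordiv]

theorem pvSeg_succ (N t k : Int) : pvSeg N t (k + 1) = pvSeg N t k + (N - t - k) := by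
  unfold pvSeg
  rw [PySem.Int.floordiv_eq_ediv_of_pos (by omega), PySem.Int.floordiv_eq_ediv_of_pos (by omega)]
  have h : (k + 1) * (k + 1 - 1) = k * (k - 1) + 2 * k := by ring
  rw [h]
  have h2 : (k * (k - 1) + 2 * k) / 2 = k * (k - 1) / 2 + k := by omega
  rw [h2]; ring

-- the inner-loop invariant: A's power is N - t - k, and the sum of A's appended powers
-- equals B's flushed total plus the closed form of the open segment
theorem pvInner (N : Int) (c : Int → String) (rs : List Int) :
    ∀ (vals : List Int) (t k tot : Int),
      (rs.foldl (pvFA N c) (vals, N - t - k)).2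
        = N - (rs.foldl (pvFB N c) (t, k, tot)).1 - (rs.foldl (pvFB N c) (t, k, tot)).2.1
      ∧ pvSum (rs.foldl (pvFA N c) (vals, N - t - k)).1
        = pvSum vals
          + ((rs.foldl (pvFB N c) (t, k, tot)).2.2
             + pvSeg N (rs.foldl (pvFB N c) (t, k, tot)).1 (rs.foldl (pvFB N c) (t, k, tot)).2.1)
          - (tot + pvSeg N t k) := by
  induction rs with
  | nil => intro vals t k tot; constructor <;> simp
  | cons row rs ih =>
    intro vals t k tot
    by_cases hH : c row = "#"
    · have hO : ¬ c row = "O" := by rw [hH]; decide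
      have hstepA : pvFA N c (vals, N - t - k) row = (vals, N - (row + 1) - 0) := by
        simp [pvFA, hH]; ring
      have hstepB : pvFB N c (t, k, tot) row = (row + 1, 0, tot + pvSeg N t k) := by
        simp only [pvFB, hH, if_pos, pvSeg]
        have hx : tot + k * (N - t) - PySem.Int.floordiv (k * (k - 1)) 2
            = tot + (k * (N - t) - PySem.Int.floordiv (k * (k - 1)) 2) := by
          generalize PySem.Int.floordiv (k * (k - 1)) 2 = x
          ring
        rw [hx]
      rw [List.foldl_cons, List.foldl_cons, hstepA, hstepB]
      obtain ⟨h1, h2⟩ := ih vals (row + 1) 0 (tot + pvSeg N t k)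
      refine ⟨h1, ?_⟩
      rw [h2, pvSeg_zero]; ring
    · by_cases hO : c row = "O"
      · have hstepA : pvFA N c (vals, N - t - k) row = (vals ++ [N - t - k], N - t - (k + 1)) := by
          simp [pvFA, hO]; ring
        have hstepB : pvFB N c (t, k, tot) row = (t, k + 1, tot) := by
          simp [pvFB, hO]
        rw [List.foldl_cons, List.foldl_cons, hstepA, hstepB]
        obtain ⟨h1, h2⟩ := ih (vals ++ [N - t - k]) t (k + 1) tot
        refine ⟨h1, ?_⟩
        rw [h2, pvSum_append, pvSeg_succ]; ring
      · have hstepA : pvFA N c (vals, N - t - k) row = (vals, N - t - k) := by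
          simp [pvFA, hO, hH]
        have hstepB : pvFB N c (t, k, tot) row = (t, k, tot) := by
          simp [pvFB, hO, hH]
        rw [List.foldl_cons, List.foldl_cons, hstepA, hstepB]
        exact ih vals t k tot

-- one column: the sum of A's appended powers equals what B's column pass adds to its total
theorem pvCol_eq (N : Int) (c : Int → String) (rows : List Int) (tot : Int) :
    pvSum (pvColA N c rows) = pvColB N c rows tot - tot := by
  obtain ⟨-, h2⟩ := pvInner N c rows [] 0 0 tot
  rw [show N - (0 : Int) - 0 = N from by ring] at h2
  simp only [pvColA, pvColB]
  rw [h2, pvSum_nil, pvSeg_zero]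
  simp only [pvSeg]
  generalize PySem.Int.floordiv ((rows.foldl (pvFB N c) (0, 0, tot)).2.1 * ((rows.foldl (pvFB N c) (0, 0, tot)).2.1 - 1)) 2 = x
  ring

-- the outer loop: A's grand total over the processed columns equals B's running total
theorem pvOuter (N : Int) (cell : Int → Int → String) (rows : List Int) (cs : List Int) :
    ∀ (results : List (List Int)) (tot : Int),
      pvSum ((cs.foldl
          (fun results col => results ++ [pvColA N (cell col) rows]) results).map pvSum)
      = pvSum (results.map pvSum)
        + (cs.foldl (fun total col => pvColB N (cell col) rows total) tot) - tot := by
  induction cs with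
  | nil => intro results tot; simp only [List.foldl_nil]; ring
  | cons col cs ih =>
    intro results tot
    simp only [List.foldl_cons]
    rw [ih (results ++ [pvColA N (cell col) rows]) (pvColB N (cell col) rows tot)]
    simp only [List.map_append, List.map_cons, List.map_nil]
    rw [pvSum_append, pvCol_eq N (cell col) rows tot]
    ring

-- ===== VERDICT (by name: the statement is the Claim_ definition above) =====
theorem calculate_north_load_spec : Claim_equal_calculate_north_load := by
  intro grid _ _
  show calculate_north_load grid = calculate_north_load_alt grid
  have h := pvOuter (grid.length : Int)
      (fun col row => PySem.List.pyGetD (PySem.List.pyGetD grid row ([] : List String)) col "")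
      (PySem.List.pyRange 0 (grid.length : Int) 1)
      (PySem.List.pyRange 0 ((PySem.List.pyGetD grid 0 ([] : List String)).length : Int) 1)
      [] 0
  rw [List.map_nil, pvSum_nil, show ∀ x : Int, 0 + x - 0 = x from fun x => by ring] at h
  exact h
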